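-- pv_equiv track=rewrite | github.com/NBNEORIGIN/cairn | core/amazon_intel/parsers/flatfile.py | _build_header_index
-- ===== SOURCE A (Python) =====
-- def _build_header_index(row4_values: list) -> dict[tuple[str, int], int]:
--     """
--     Build a mapping of (header_name, ordinal) -> column_index from Row 4.
--     Handles duplicate header names by counting occurrences left to right.
--     """
--     counts: dict[str, int] = {}
--     index: dict[tuple[str, int], int] = {}
--     for col_idx, val in enumerate(row4_values):
--         name = str(val).strip() if val else ''
--         if not name:
--             continue
--         ordinal = counts.get(name, 0)
--         counts[name] = ordinal + 1
--         index[(name, ordinal)] = col_idx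
--     return index
-- ===== SOURCE B (Python) =====
-- def _build_header_index(row4_values: list) -> dict[tuple[str, int], int]:
--     """Staged rewrite: group column indices by cleaned header name, assign
--     ordinals by enumerating each group's list, then sort the entries back
--     into column order (column indices are distinct, so this restores the
--     left-to-right insertion order) and build the dict from them."""
--     groups: dict[str, list[int]] = {}
--     for col_idx, val in enumerate(row4_values):
--         name = str(val).strip() if val else ''
--         if name:
--             groups.setdefault(name, []).append(col_idx)
--     entries = []
--     for name, cols in groups.items():
--         for ordinal, col_idx in enumerate(cols):
--             entries.append(((name, ordinal), col_idx))
--     entries.sort(key=lambda e: e[1])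
--     return dict(entries)
-- ===== Notes on version B (the rewrite author's own statement) =====
-- stated objective: alternative
-- what changed: Replaces the single pass with a running per-name counter by a staged pipeline: group column indices by cleaned name into lists, assign ordinals by enumerating each group, sort the entries back into column order, and build the dict from the sorted entries.
import Mathlib
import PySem

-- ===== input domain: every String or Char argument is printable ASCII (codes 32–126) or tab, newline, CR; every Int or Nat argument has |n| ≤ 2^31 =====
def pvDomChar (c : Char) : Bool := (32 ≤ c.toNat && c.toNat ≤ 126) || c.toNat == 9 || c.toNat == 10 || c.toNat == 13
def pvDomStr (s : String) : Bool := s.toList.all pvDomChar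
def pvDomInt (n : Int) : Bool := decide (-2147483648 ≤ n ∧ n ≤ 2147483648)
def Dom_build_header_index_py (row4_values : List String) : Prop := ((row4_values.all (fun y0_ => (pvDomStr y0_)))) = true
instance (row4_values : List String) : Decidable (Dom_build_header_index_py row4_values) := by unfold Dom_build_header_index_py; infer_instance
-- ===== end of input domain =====

-- B replaces A's single pass with a running per-name counter by a staged pipeline:
-- group column indices by cleaned name, enumerate each group to assign ordinals,
-- sort the entries back into column order, and build the dict from them; an
-- alternative decomposition, not claimed faster.


-- shared helper: the cleaned name `str(val).strip() if val else ''` (both Pythons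
-- use this identical expression; on String inputs `str(val)` is `val` and `if val`
-- is `val != ''`)
def pvClean (v : String) : String := if v = "" then "" else PySem.Str.strip v

-- ===== PORT A =====
-- single pass; loop state: (counts, index); returns index.items flattened to (name, ordinal, col_idx)
def build_header_index_py (row4_values : List String) : List (String × Int × Int) :=
  let st :=
    (PySem.List.enumerate row4_values 0).foldl
      (fun (s : PySem.Dict String Int × PySem.Dict (String × Int) Int) p =>
        let name := pvClean p.2
        if name = "" then s
        else
          let ordinal := s.1.getD name 0
          (s.1.insert name (ordinal + 1), s.2.insert (name, ordinal) p.1))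
      (PySem.Dict.empty, PySem.Dict.empty)
  st.2.items.map (fun p => (p.1.1, p.1.2, p.2))

-- ===== PORT B =====
-- staged: (1) group column indices by cleaned name into lists; (2) flatten the
-- groups, enumerating each group's list to assign ordinals; (3) sort the entries
-- by column index; (4) dict(entries)
def build_header_index_py_alt (row4_values : List String) : List (String × Int × Int) :=
  let groups :=
    (PySem.List.enumerate row4_values 0).foldl
      (fun (g : PySem.Dict String (List Int)) p =>
        let name := pvClean p.2
        if name = "" then g
        else g.modify name [] (fun cols => cols ++ [p.1]))
      PySem.Dict.empty
  let entries :=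
    groups.items.foldl
      (fun (acc : List ((String × Int) × Int)) kv =>
        acc ++ (PySem.List.enumerate kv.2 0).map (fun q => ((kv.1, q.1), q.2)))
      []
  let d := PySem.Dict.ofList (PySem.List.sorted entries (fun e => e.2))
  d.items.map (fun p => (p.1.1, p.1.2, p.2))

-- ===== PRECONDITION & SPEC =====
def Spec_build_header_index_py (row4_values : List String) (out : List (String × Int × Int)) : Prop := out = build_header_index_py_alt row4_values
instance (row4_values : List String) (out : List (String × Int × Int)) : Decidable (Spec_build_header_index_py row4_values out) := by unfold Spec_build_header_index_py; infer_instance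

-- ===== CLAIM (what is proved, stated in full; the proofs are below) =====
def Claim_equal_build_header_index_py : Prop := ∀ (row4_values : List String), Dom_build_header_index_py row4_values → Spec_build_header_index_py row4_values (build_header_index_py row4_values)

-- ===== LEMMAS AND PROOFS =====

-- proof-side canonical description: the cleaned names, the enumerated nonempty
-- names, each entry ((name, #occurrences among earlier names), column), and the
-- dict built from those entries in column order
def pvNames (row : List String) : List String := row.map pvClean
def pvF (row : List String) : List (Int × String) :=
  (PySem.List.enumerate (pvNames row) 0).filter (fun p => decide ¬(p.2 = ""))
def pvG (row : List String) (p : Int × String) : (String × Int) × Int :=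
  ((p.2, (((pvNames row).take p.1.toNat).count p.2 : Int)), p.1)
def pvCanon (row : List String) : List ((String × Int) × Int) := (pvF row).map (pvG row)
def pvDict (row : List String) : PySem.Dict (String × Int) Int :=
  (pvCanon row).foldl (fun d e => d.insert e.1 e.2) PySem.Dict.empty
def pvGroups (row : List String) : PySem.Dict String (List Int) :=
  (pvF row).foldl (fun (g : PySem.Dict String (List Int)) p => g.modify p.2 [] (fun c => c ++ [p.1])) PySem.Dict.empty

-- enumerate distributes over map
theorem pv_enumerate_map {α β : Type} (l : List α) (f : α → β) (s : Int) :
    PySem.List.enumerate (l.map f) s = (PySem.List.enumerate l s).map (fun p => (p.1, f p.2)) := by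
  induction l generalizing s with
  | nil => simp [PySem.List.enumerate_nil]
  | cons x t ih => simp [PySem.List.enumerate_cons, ih]

-- A's loop, after a processed prefix t, equals the prefix-count insertion loop
-- over the cleaned suffix (invariant: counts agrees with occurrence counts in t)
theorem pv_loop_eq (row : List String) :
    ∀ (s t : List String) (c : PySem.Dict String Int)
      (dA dB : PySem.Dict (String × Int) Int),
      row = t ++ s →
      dA = dB →
      (∀ n : String, n ≠ "" → c.getD n 0 = ((t.map pvClean).count n : Int)) →
      ((PySem.List.enumerate s (t.length : Int)).foldl
        (fun (st : PySem.Dict String Int × PySem.Dict (String × Int) Int) p =>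
          let name := pvClean p.2
          if name = "" then st
          else
            let ordinal := st.1.getD name 0
            (st.1.insert name (ordinal + 1), st.2.insert (name, ordinal) p.1))
        (c, dA)).2
      =
      (PySem.List.enumerate (s.map pvClean) (t.length : Int)).foldl
        (fun (d : PySem.Dict (String × Int) Int) p =>
          if p.2 = "" then d
          else d.insert (p.2, ((PySem.List.slice (row.map pvClean) none (some p.1)).count p.2 : Int)) p.1)
        dB := by
  intro s
  induction s with
  | nil =>
    intro t c dA dB hrow hd hc
    simpa [PySem.List.enumerate_nil] using hd
  | cons v vs ih =>
    intro t c dA dB hrow hd hc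
    rw [List.map_cons, PySem.List.enumerate_cons, PySem.List.enumerate_cons,
        List.foldl_cons, List.foldl_cons]
    dsimp only
    have h1 : ((t ++ [v]).length : Int) = (t.length : Int) + 1 := by
      simp
    have htake : PySem.List.slice (row.map pvClean) none (some (t.length : Int))
        = (t.map pvClean) := by
      rw [PySem.List.slice_to_natCast, hrow, List.map_append,
          List.take_append_of_le_length (by simp)]
      simp
    by_cases hv : pvClean v = ""
    · -- empty cleaned name: both sides skip this column
      rw [if_pos hv, if_pos hv, ← h1]
      exact ih (t ++ [v]) c dA dB (by simpa using hrow) hd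
        (by
          intro n hn
          rw [hc n hn, List.map_append, List.count_append]
          simp [hv, Ne.symm hn])
    · -- nonempty name: both sides insert the same (key, value) pair
      rw [if_neg hv, if_neg hv, htake, ← hc (pvClean v) hv, ← h1]
      exact ih (t ++ [v])
        (c.insert (pvClean v) (c.getD (pvClean v) 0 + 1))
        _ _
        (by simpa using hrow)
        (by rw [hd])
        (by
          intro n hn
          rw [PySem.Dict.getD_insert, List.map_append, List.count_append]
          by_cases hnv : n = pvClean v
          · subst hnv
            rw [if_pos rfl, hc _ hn]
            simp
          · rw [if_neg hnv, hc n hn]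
            simp [Ne.symm hnv])

-- A's index dict is pvDict
theorem pv_A_dict (row : List String) :
    ((PySem.List.enumerate row 0).foldl
      (fun (s : PySem.Dict String Int × PySem.Dict (String × Int) Int) p =>
        let name := pvClean p.2
        if name = "" then s
        else
          let ordinal := s.1.getD name 0
          (s.1.insert name (ordinal + 1), s.2.insert (name, ordinal) p.1))
      (PySem.Dict.empty, PySem.Dict.empty)).2 = pvDict row := by
  have h := pv_loop_eq row row [] PySem.Dict.empty PySem.Dict.empty PySem.Dict.empty
    (by simp) rfl (by intro n hn; simp)
  simp only [List.length_nil, Int.natCast_zero] at h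
  rw [h]
  rw [show (fun (d : PySem.Dict (String × Int) Int) (p : Int × String) =>
        if p.2 = "" then d
        else d.insert (p.2, ((PySem.List.slice (row.map pvClean) none (some p.1)).count p.2 : Int)) p.1)
      = (fun (d : PySem.Dict (String × Int) Int) (p : Int × String) =>
        if ¬(p.2 = "") then d.insert (p.2, ((PySem.List.slice (row.map pvClean) none (some p.1)).count p.2 : Int)) p.1 else d)
    from by funext d p; by_cases hp : p.2 = "" <;> simp [hp]]
  rw [PySem.List.foldl_ite_eq_foldl_filter (p := fun p : Int × String => ¬(p.2 = ""))
      (fun (d : PySem.Dict (String × Int) Int) (p : Int × String) =>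
        d.insert (p.2, ((PySem.List.slice (row.map pvClean) none (some p.1)).count p.2 : Int)) p.1)]
  have h3 := PySem.List.foldl_congr_mem
    (l := pvF row) (init := (PySem.Dict.empty : PySem.Dict (String × Int) Int))
    (f := fun (d : PySem.Dict (String × Int) Int) (p : Int × String) =>
        d.insert (p.2, ((PySem.List.slice (row.map pvClean) none (some p.1)).count p.2 : Int)) p.1)
    (g := fun (d : PySem.Dict (String × Int) Int) (p : Int × String) =>
        d.insert (pvG row p).1 (pvG row p).2)
    (by
      intro d p hp
      have hp' := List.mem_of_mem_filter hp
      rw [PySem.List.mem_enumerate_iff] at hp'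
      obtain ⟨kk, hkk, rfl⟩ := hp'
      simp [pvG, pvNames, PySem.List.slice_to_natCast])
  rw [show ((PySem.List.enumerate (row.map pvClean) 0).filter
        (fun p : Int × String => decide ¬(p.2 = ""))) = pvF row from rfl]
  rw [h3]
  rw [show pvDict row
      = (pvF row).foldl (fun (d : PySem.Dict (String × Int) Int) p => d.insert (pvG row p).1 (pvG row p).2) PySem.Dict.empty from by
    unfold pvDict pvCanon; rw [List.foldl_map]]

-- B's groups dict is pvGroups
theorem pv_B_groups (row : List String) :
    (PySem.List.enumerate row 0).foldl
      (fun (g : PySem.Dict String (List Int)) p =>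
        let name := pvClean p.2
        if name = "" then g
        else g.modify name [] (fun cols => cols ++ [p.1]))
      PySem.Dict.empty = pvGroups row := by
  rw [show (PySem.List.enumerate row 0).foldl
      (fun (g : PySem.Dict String (List Int)) p =>
        let name := pvClean p.2
        if name = "" then g else g.modify name [] (fun cols => cols ++ [p.1]))
      PySem.Dict.empty
    = (PySem.List.enumerate (row.map pvClean) 0).foldl
      (fun (g : PySem.Dict String (List Int)) q =>
        if q.2 = "" then g else g.modify q.2 [] (fun cols => cols ++ [q.1]))
      PySem.Dict.empty from by
    rw [pv_enumerate_map row pvClean 0, List.foldl_map]]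
  rw [show (fun (g : PySem.Dict String (List Int)) (q : Int × String) =>
        if q.2 = "" then g else g.modify q.2 [] (fun cols => cols ++ [q.1]))
      = (fun (g : PySem.Dict String (List Int)) (q : Int × String) =>
        if ¬(q.2 = "") then g.modify q.2 [] (fun cols => cols ++ [q.1]) else g)
    from by funext g q; by_cases hq : q.2 = "" <;> simp [hq]]
  rw [PySem.List.foldl_ite_eq_foldl_filter (p := fun q : Int × String => ¬(q.2 = ""))
      (fun (g : PySem.Dict String (List Int)) (q : Int × String) =>
        g.modify q.2 [] (fun cols => cols ++ [q.1]))]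
  rfl

theorem pv_groups_keys (row : List String) :
    (pvGroups row).keys = PySem.Set.ofList ((pvF row).map (fun p => p.2)) := by
  unfold pvGroups
  rw [PySem.Dict.keys_foldl_modify_key (pvF row) (fun p => p.2) []
      (fun _ p => fun c => c ++ [p.1]) PySem.Dict.empty]
  rw [PySem.Dict.keys_empty, PySem.Set.ofList_eq_foldl]
  rfl

theorem pv_groups_nodup (row : List String) : (pvGroups row).keys.Nodup := by
  unfold pvGroups
  exact PySem.Dict.nodup_keys_foldl_modify_key (pvF row) (fun p => p.2) []
    (fun _ p => fun c => c ++ [p.1]) PySem.Dict.empty (by simp [PySem.Dict.keys_empty])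

theorem pv_groups_getD (row : List String) (k : String) :
    (pvGroups row).getD k [] = ((pvF row).filter (fun p => p.2 == k)).map (fun p => p.1) := by
  unfold pvGroups
  rw [show (pvF row).foldl
      (fun (g : PySem.Dict String (List Int)) p => g.modify p.2 [] (fun c => c ++ [p.1]))
      PySem.Dict.empty
    = ((pvF row).map Prod.swap).foldl
      (fun (g : PySem.Dict String (List Int)) q => g.modify q.1 [] (fun c => c ++ [q.2]))
      PySem.Dict.empty from by rw [List.foldl_map]; rfl]
  rw [PySem.Dict.getD_foldl_modify_append, PySem.Dict.getD_empty, List.filter_map,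
      List.map_map]
  rfl

-- the counting lemma: the j-th column carrying name v has exactly j earlier
-- occurrences of v
theorem pv_count_take {α : Type} [BEq α] [LawfulBEq α] (v : α) :
    ∀ (l : List α) (s : Int) (j : Nat) (p : Int × α),
      ((PySem.List.enumerate l s).filter (fun q => q.2 == v))[j]? = some p →
      (l.take ((p.1 - s).toNat)).count v = j := by
  intro l
  induction l with
  | nil => intro s j p hp; simp [PySem.List.enumerate_nil] at hp
  | cons x t ih =>
    intro s j p hp
    rw [PySem.List.enumerate_cons] at hp
    by_cases hx : x = v
    · rw [List.filter_cons_of_pos (by simp [hx])] at hp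
      cases j with
      | zero =>
        rw [List.getElem?_cons_zero] at hp
        cases hp
        simp
      | succ j =>
        rw [List.getElem?_cons_succ] at hp
        have h1 : s + 1 ≤ p.1 := by
          have hmem : p ∈ PySem.List.enumerate t (s + 1) :=
            List.mem_of_mem_filter (List.mem_of_getElem? hp)
          rw [PySem.List.mem_enumerate_iff] at hmem
          obtain ⟨m, hm, rfl⟩ := hmem
          simp
        have h2 : (p.1 - s).toNat = (p.1 - (s + 1)).toNat + 1 := by omega
        rw [h2, List.take_succ_cons]
        have hih := ih (s + 1) j p hp
        simp [hx, hih]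
    · rw [List.filter_cons_of_neg (by simp [hx])] at hp
      have h1 : s + 1 ≤ p.1 := by
        have hmem : p ∈ PySem.List.enumerate t (s + 1) :=
          List.mem_of_mem_filter (List.mem_of_getElem? hp)
        rw [PySem.List.mem_enumerate_iff] at hmem
        obtain ⟨m, hm, rfl⟩ := hmem
        simp
      have h2 : (p.1 - s).toNat = (p.1 - (s + 1)).toNat + 1 := by omega
      rw [h2, List.take_succ_cons]
      have hih := ih (s + 1) j p hp
      simp [hx, hih]

-- the group of name k, enumerated, is exactly the k-entries of pvCanon
theorem pv_group_eq (row : List String) (k : String) (hk : k ≠ "") :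
    (PySem.List.enumerate (((pvF row).filter (fun p => p.2 == k)).map (fun p => p.1)) 0).map
        (fun q => ((k, q.1), q.2))
      = (pvCanon row).filter (fun e => e.1.1 == k) := by
  have hFk : (pvF row).filter (fun p => p.2 == k)
      = (PySem.List.enumerate (pvNames row) 0).filter (fun p => p.2 == k) := by
    unfold pvF
    rw [List.filter_filter]
    apply List.filter_congr
    intro p _
    by_cases hp : p.2 = k
    · simp [hp, hk]
    · simp [hp]
  unfold pvCanon
  rw [List.filter_map]
  rw [show ((fun e : (String × Int) × Int => e.1.1 == k) ∘ pvG row)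
      = (fun p : Int × String => p.2 == k) from rfl]
  rw [hFk, pv_enumerate_map, List.map_map]
  apply List.ext_getElem
  · simp
  · intro j h1 h2
    have hjlen : j < ((PySem.List.enumerate (pvNames row) 0).filter (fun p => p.2 == k)).length := by
      simpa using h2
    have hjk : (((PySem.List.enumerate (pvNames row) 0).filter (fun p => p.2 == k))[j]).2 = k := by
      have hb := List.getElem_filter
        (xs := PySem.List.enumerate (pvNames row) 0) (p := fun p => p.2 == k) (i := j) hjlen
      exact eq_of_beq hb
    have hc := pv_count_take k (pvNames row) 0 j _ (List.getElem?_eq_getElem hjlen)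
    simp only [sub_zero] at hc
    simp only [List.getElem_map, PySem.List.getElem_enumerate, Function.comp_apply]
    unfold pvG
    rw [hjk, hc]
    simp

-- a list is a permutation of its per-key groups, for any duplicate-free key list
-- covering it
theorem pv_perm_flatMap_filter {α κ : Type} [BEq κ] [LawfulBEq κ] (key : α → κ) :
    ∀ (K : List κ) (l : List α), K.Nodup → (∀ x ∈ l, key x ∈ K) →
      (K.flatMap (fun k => l.filter (fun x => key x == k))).Perm l := by
  intro K
  induction K with
  | nil =>
    intro l _ hcov
    cases l with
    | nil => simp
    | cons x t => exact absurd (hcov x (by simp)) (by simp)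
  | cons k K ih =>
    intro l hnd hcov
    rw [List.flatMap_cons]
    have hflat : K.flatMap (fun k' => l.filter (fun x => key x == k'))
        = K.flatMap (fun k' => (l.filter (fun x => !(key x == k))).filter (fun x => key x == k')) := by
      rw [List.flatMap_def, List.flatMap_def]
      congr 1
      apply List.map_congr_left
      intro k' hk'
      rw [List.filter_filter]
      have hkk : ¬ k' = k := by
        rintro rfl
        exact (List.nodup_cons.mp hnd).1 hk'
      apply List.filter_congr
      intro x _
      by_cases hx : key x = k'
      · simp [hx, hkk]
      · simp [hx]
    rw [hflat]
    have hcov' : ∀ x ∈ l.filter (fun x => !(key x == k)), key x ∈ K := by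
      intro x hx
      have hxl := List.mem_of_mem_filter hx
      have hne : (key x == k) = false := by
        have hb := List.of_mem_filter hx
        simpa using hb
      rcases List.mem_cons.mp (hcov x hxl) with hcase | hcase
      · exact absurd (by simp [hcase] : (key x == k) = true) (by simp [hne])
      · exact hcase
    have hperm := ih (l.filter (fun x => !(key x == k))) (List.nodup_cons.mp hnd).2 hcov'
    exact (hperm.append_left (l.filter (fun x => key x == k))).trans
      (List.filter_append_perm _ l)

theorem pv_canon_pairwise (row : List String) :
    (pvCanon row).Pairwise (fun a b => a.2 < b.2) := by
  unfold pvCanon pvF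
  rw [List.pairwise_map]
  exact (PySem.List.pairwise_lt_enumerate (pvNames row) 0).filter _

-- B's entries list, sorted by column, is pvCanon
theorem pv_sorted_entries (row : List String) :
    PySem.List.sorted
      ((pvGroups row).items.foldl
        (fun (acc : List ((String × Int) × Int)) kv =>
          acc ++ (PySem.List.enumerate kv.2 0).map (fun q => ((kv.1, q.1), q.2)))
        [])
      (fun e => e.2) = pvCanon row := by
  have hitems : (pvGroups row).items
      = (PySem.Set.ofList ((pvF row).map (fun p => p.2))).map
          (fun k => (k, (pvGroups row).getD k [])) := by
    rw [← pv_groups_keys row]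
    exact PySem.Dict.items_eq_map_keys _ (pv_groups_nodup row) []
  have hentries : ((pvGroups row).items.foldl
        (fun (acc : List ((String × Int) × Int)) kv =>
          acc ++ (PySem.List.enumerate kv.2 0).map (fun q => ((kv.1, q.1), q.2)))
        [])
      = (PySem.Set.ofList ((pvF row).map (fun p => p.2))).flatMap
          (fun k => (pvCanon row).filter (fun e => e.1.1 == k)) := by
    rw [PySem.List.foldl_append_eq_flatMap, List.nil_append, hitems, List.flatMap_map]
    rw [List.flatMap_def, List.flatMap_def]
    congr 1
    apply List.map_congr_left
    intro k hkK
    have hk : k ≠ "" := by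
      rw [PySem.Set.mem_ofList] at hkK
      obtain ⟨p, hp, rfl⟩ := List.mem_map.mp hkK
      have hb := List.of_mem_filter hp
      simpa using hb
    simp only [pv_groups_getD]
    exact pv_group_eq row k hk
  rw [hentries]
  apply PySem.List.sorted_eq_of_perm_of_pairwise_lt
  · exact (pv_perm_flatMap_filter (fun e => e.1.1) _ (pvCanon row)
      (PySem.Set.nodup_ofList _) (by
        intro e he
        rw [PySem.Set.mem_ofList]
        obtain ⟨p, hp, rfl⟩ := List.mem_map.mp he
        show (fun p : Int × String => p.2) p ∈ (pvF row).map (fun p => p.2)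
        exact List.mem_map_of_mem hp)).symm
  · exact pv_canon_pairwise row

-- ===== VERDICT (by name: the statement is the Claim_ definition above) =====
theorem build_header_index_py_spec : Claim_equal_build_header_index_py := by
  intro row _
  unfold Spec_build_header_index_py build_header_index_py build_header_index_py_alt
  simp only [pv_A_dict, pv_B_groups, pv_sorted_entries]
  rfl
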